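-- pv_equiv track=rewrite | github.com/mohamedsamake8322/smart-s-n- | utils/data_validation.py | _find_similar_string
-- ===== SOURCE A (Python) =====
-- from typing import Dict, Any, List, Tuple, Optional, Union
--
-- def _find_similar_string(target: str, options: List[str]) -> Optional[str]:
--     """Find most similar string using simple similarity"""
--     target_lower = target.lower()
--
--     # Exact match (case insensitive)
--     for option in options:
--         if option.lower() == target_lower:
--             return option
--
--     # Partial match
--     for option in options:
--         if target_lower in option.lower() or option.lower() in target_lower:
--             return option
--
--     return None
-- ===== SOURCE B (Python) =====
-- from typing import List, Optional
--
-- def _find_similar_string(target: str, options: List[str]) -> Optional[str]: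
--     """Single pass: return first exact (case-insensitive) match immediately;
--     remember the first partial match as a fallback and return it at the end."""
--     target_lower = target.lower()
--     fallback = None
--     for option in options:
--         ol = option.lower()
--         if ol == target_lower:
--             return option
--         if fallback is None and (target_lower in ol or ol in target_lower):
--             fallback = option
--     return fallback
-- ===== Notes on version B (the rewrite author's own statement) =====
-- stated objective: alternative
-- what changed: Replaced A's two sequential scans (exact-match pass then partial-match pass) with a single pass that returns immediately on an exact match and stores the first partial match as a fallback, lowercasing each option once instead of up to three times.
import Mathlib
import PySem

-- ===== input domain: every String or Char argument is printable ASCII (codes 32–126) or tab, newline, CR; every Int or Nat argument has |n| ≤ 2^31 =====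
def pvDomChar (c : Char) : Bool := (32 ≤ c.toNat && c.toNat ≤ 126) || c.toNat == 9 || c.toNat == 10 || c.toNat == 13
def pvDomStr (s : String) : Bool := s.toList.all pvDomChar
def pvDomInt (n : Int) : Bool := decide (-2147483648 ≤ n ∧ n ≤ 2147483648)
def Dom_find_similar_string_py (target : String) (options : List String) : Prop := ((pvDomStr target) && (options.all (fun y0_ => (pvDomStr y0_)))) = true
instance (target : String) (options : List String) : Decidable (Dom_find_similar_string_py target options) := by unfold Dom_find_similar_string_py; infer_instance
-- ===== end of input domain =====

-- B does one pass (exact match returns at once, first partial match kept as fallback)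
-- instead of A's two scans; same result, a different decomposition.

-- ===== PORT A =====
-- A: first loop returns the first case-insensitive exact match; second loop the
-- first partial (substring either way) match; else None.
def find_similar_string_py (target : String) (options : List String) : Option String :=
  let target_lower := PySem.Str.lower target
  match options.find? (fun option => PySem.Str.lower option == target_lower) with
  | some option => some option
  | none =>
    match options.find? (fun option =>
        PySem.Str.isIn target_lower (PySem.Str.lower option) ||
        PySem.Str.isIn (PySem.Str.lower option) target_lower) with
    | some option => some option
    | none => none

-- ===== PORT B =====
-- B's loop: lowercase each option once; exact match returns immediately; first
-- partial match is stored in `fallback`; after the loop return the fallback.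
def find_similar_string_alt_go (target_lower : String) (fallback : Option String) :
    List String → Option String
  | [] => fallback
  | option :: rest =>
    let ol := PySem.Str.lower option
    if ol == target_lower then some option
    else if fallback.isNone &&
        (PySem.Str.isIn target_lower ol || PySem.Str.isIn ol target_lower) then
      find_similar_string_alt_go target_lower (some option) rest
    else
      find_similar_string_alt_go target_lower fallback rest

def find_similar_string_py_alt (target : String) (options : List String) : Option String :=
  find_similar_string_alt_go (PySem.Str.lower target) none options

-- ===== PRECONDITION & SPEC =====
def Spec_find_similar_string_py (target : String) (options : List String) (out : Option String) : Prop := out = find_similar_string_py_alt target options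
instance (target : String) (options : List String) (out : Option String) : Decidable (Spec_find_similar_string_py target options out) := by unfold Spec_find_similar_string_py; infer_instance

-- ===== CLAIM (what is proved, stated in full; the proofs are below) =====
def Claim_equal_find_similar_string_py : Prop := ∀ (target : String) (options : List String), Dom_find_similar_string_py target options → Spec_find_similar_string_py target options (find_similar_string_py target options)

-- ===== LEMMAS AND PROOFS =====

-- Invariant of B's loop: it equals "first exact match, else the stored fallback, else first partial match".
theorem find_similar_string_alt_go_eq (tl : String) :
    ∀ (opts : List String) (fb : Option String),
      find_similar_string_alt_go tl fb opts =
        match opts.find? (fun o => PySem.Str.lower o == tl) with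
        | some o => some o
        | none =>
          fb.or (opts.find? (fun o =>
            PySem.Str.isIn tl (PySem.Str.lower o) || PySem.Str.isIn (PySem.Str.lower o) tl))
  | [], fb => by cases fb <;> simp [find_similar_string_alt_go, Option.or]
  | o :: rest, fb => by
    simp only [find_similar_string_alt_go, List.find?_cons]
    cases he : (PySem.Str.lower o == tl) with
    | true => simp
    | false =>
      simp only [Bool.false_eq_true, if_false]
      cases hb2 : (PySem.Str.isIn tl (PySem.Str.lower o) || PySem.Str.isIn (PySem.Str.lower o) tl) with
      | false =>
        simp only [Bool.and_false, Bool.false_eq_true, if_false]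
        exact find_similar_string_alt_go_eq tl rest fb
      | true =>
        cases fb with
        | some x =>
          simp only [Option.isNone_some, Bool.false_and, Bool.false_eq_true, if_false]
          exact find_similar_string_alt_go_eq tl rest (some x)
        | none =>
          simp only [Option.isNone_none, Bool.true_and, if_true]
          rw [find_similar_string_alt_go_eq tl rest (some o)]
          cases rest.find? (fun o => PySem.Str.lower o == tl) <;>
            cases rest.find? (fun o =>
              PySem.Str.isIn tl (PySem.Str.lower o) || PySem.Str.isIn (PySem.Str.lower o) tl) <;>
            rfl
-- ===== VERDICT (by name: the statement is the Claim_ definition above) =====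
theorem find_similar_string_py_spec : Claim_equal_find_similar_string_py := by
  intro target options _
  simp only [Spec_find_similar_string_py, find_similar_string_py, find_similar_string_py_alt]
  rw [find_similar_string_alt_go_eq]
  cases options.find? (fun option => PySem.Str.lower option == PySem.Str.lower target) with
  | some o => rfl
  | none =>
    cases options.find? (fun option =>
        PySem.Str.isIn (PySem.Str.lower target) (PySem.Str.lower option) ||
        PySem.Str.isIn (PySem.Str.lower option) (PySem.Str.lower target)) <;> rfl
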